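-- pv_equiv track=rewrite | github.com/shebak11/emotionalPhenome | carsonNLP/language_carson.py | split_dialogue
-- ===== SOURCE A (Python) =====
-- def split_dialogue(dialog_seq):
-- 	responses_from_A = []
-- 	responses_from_B = []
-- 	for i in range(0, len(dialog_seq)):
-- 		if i % 2 == 0:
-- 			responses_from_A.append(dialog_seq[i])
-- 		else:
-- 			responses_from_B.append(dialog_seq[i])
-- 	return (responses_from_A, responses_from_B)
-- ===== SOURCE B (Python) =====
-- def split_dialogue(dialog_seq):
-- 	responses_from_A = []
-- 	responses_from_B = []
-- 	i = 0
-- 	n = len(dialog_seq)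
-- 	while i + 1 < n:
-- 		responses_from_A.append(dialog_seq[i])
-- 		responses_from_B.append(dialog_seq[i + 1])
-- 		i += 2
-- 	if i < n:
-- 		responses_from_A.append(dialog_seq[i])
-- 	return (responses_from_A, responses_from_B)
-- ===== Notes on version B (the rewrite author's own statement) =====
-- stated objective: alternative
-- what changed: Replaces the per-index loop with an i % 2 parity branch by a pair-stepping loop that consumes two elements per iteration (one to each output) with an odd-tail case, removing the parity test entirely.
import Mathlib
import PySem

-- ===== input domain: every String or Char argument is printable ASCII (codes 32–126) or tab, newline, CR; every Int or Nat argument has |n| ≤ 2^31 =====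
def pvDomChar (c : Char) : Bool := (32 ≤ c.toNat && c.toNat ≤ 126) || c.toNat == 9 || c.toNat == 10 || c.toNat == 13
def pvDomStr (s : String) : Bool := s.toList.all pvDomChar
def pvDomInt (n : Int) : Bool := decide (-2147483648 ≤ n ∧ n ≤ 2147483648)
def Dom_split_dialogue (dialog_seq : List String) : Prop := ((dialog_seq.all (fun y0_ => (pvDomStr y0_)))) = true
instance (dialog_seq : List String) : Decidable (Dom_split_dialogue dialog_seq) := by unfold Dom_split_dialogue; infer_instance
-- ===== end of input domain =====

-- B replaces the per-index parity-branch loop with a pair-stepping loop consuming two elements per iteration (alternative decomposition, same cost).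


-- ===== PORT A =====
-- for i in range(0, len(xs)): if i % 2 == 0 then append to A else append to B
def split_dialogue (dialog_seq : List String) : List String × List String :=
  (PySem.List.pyRange 0 (dialog_seq.length : Int) 1).foldl
    (fun ab i =>
      if PySem.Int.mod i 2 == 0 then
        (ab.1 ++ [PySem.List.pyGetD dialog_seq i ""], ab.2)
      else
        (ab.1, ab.2 ++ [PySem.List.pyGetD dialog_seq i ""]))
    ([], [])

-- ===== PORT B =====
-- the while-loop of Source B: each iteration takes the next two remaining elements,
-- appending one to each accumulator; a single leftover element goes to the first.
def altLoop (rest accA accB : List String) : List String × List String :=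
  match rest with
  | [] => (accA, accB)
  | [x] => (accA ++ [x], accB)
  | x :: y :: rest' => altLoop rest' (accA ++ [x]) (accB ++ [y])

def split_dialogue_alt (dialog_seq : List String) : List String × List String :=
  altLoop dialog_seq [] []

-- ===== PRECONDITION & SPEC =====
def Spec_split_dialogue (dialog_seq : List String) (out : List String × List String) : Prop := out = split_dialogue_alt dialog_seq
instance (dialog_seq : List String) (out : List String × List String) : Decidable (Spec_split_dialogue dialog_seq out) := by unfold Spec_split_dialogue; infer_instance

-- ===== CLAIM (what is proved, stated in full; the proofs are below) =====
def Claim_equal_split_dialogue : Prop := ∀ (dialog_seq : List String), Dom_split_dialogue dialog_seq → Spec_split_dialogue dialog_seq (split_dialogue dialog_seq)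

-- ===== LEMMAS AND PROOFS =====

-- Loop invariant: starting A's index fold at an even index j with accumulators (a, b)
-- computes exactly B's pair-stepping loop on the remaining suffix xs.drop j.
lemma fold_eq_altLoop (xs : List String) (j : Nat) (hj : j % 2 = 0) (a b : List String) :
    (PySem.List.pyRange (j : Int) (xs.length : Int) 1).foldl
      (fun ab i =>
        if PySem.Int.mod i 2 == 0 then
          (ab.1 ++ [PySem.List.pyGetD xs i ""], ab.2)
        else
          (ab.1, ab.2 ++ [PySem.List.pyGetD xs i ""]))
      (a, b) = altLoop (xs.drop j) a b := by
  by_cases h : xs.length ≤ j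
  · rw [PySem.List.pyRange_one_eq_nil (by exact_mod_cast h), List.drop_eq_nil_of_le h]
    simp [altLoop]
  · replace h := Nat.lt_of_not_le h
    rw [PySem.List.pyRange_one_cons (by exact_mod_cast h)]
    simp only [List.foldl_cons]
    have hmod : PySem.Int.mod (j : Int) 2 == 0 := by
      simp only [PySem.Int.mod_eq_zero_iff_dvd, beq_iff_eq]
      omega
    rw [if_pos hmod]
    simp only [PySem.List.pyGetD_natCast]
    by_cases h2 : xs.length ≤ j + 1
    · have hlen : xs.length = j + 1 := by omega
      rw [show (j : Int) + 1 = ((j+1 : Nat) : Int) by push_cast; ring,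
          PySem.List.pyRange_one_eq_nil (by exact_mod_cast h2)]
      have hdrop : xs.drop j = [xs.getD j ""] := by
        have := List.drop_eq_getElem_cons h
        rw [this, List.drop_eq_nil_of_le (by omega)]
        simp [List.getD, List.getElem?_eq_getElem h]
      rw [hdrop]; simp [altLoop]
    · replace h2 := Nat.lt_of_not_le h2
      rw [show (j : Int) + 1 = ((j+1 : Nat) : Int) by push_cast; ring,
          PySem.List.pyRange_one_cons (by exact_mod_cast h2)]
      simp only [List.foldl_cons]
      have hmod2 : ¬ (PySem.Int.mod ((j+1 : Nat) : Int) 2 == 0) := by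
        simp only [PySem.Int.mod_eq_zero_iff_dvd, beq_iff_eq]
        omega
      rw [if_neg hmod2]
      simp only [PySem.List.pyGetD_natCast]
      have ih := fold_eq_altLoop xs (j + 2) (by omega) (a ++ [xs.getD j ""]) (b ++ [xs.getD (j+1) ""])
      rw [show ((j+1 : Nat) : Int) + 1 = ((j+2 : Nat) : Int) by push_cast; ring]
      rw [ih]
      have hdrop : xs.drop j = xs.getD j "" :: xs.getD (j+1) "" :: xs.drop (j+2) := by
        rw [List.drop_eq_getElem_cons h, List.drop_eq_getElem_cons h2]
        simp [List.getD, List.getElem?_eq_getElem h, List.getElem?_eq_getElem h2]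
      rw [hdrop]; rfl
termination_by xs.length - j

-- ===== VERDICT (by name: the statement is the Claim_ definition above) =====
theorem split_dialogue_spec : Claim_equal_split_dialogue := by
  intro xs _
  unfold Spec_split_dialogue split_dialogue split_dialogue_alt
  have h := fold_eq_altLoop xs 0 rfl [] []
  simpa using h
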